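-- pv_equiv track=rewrite | github.com/daniel-reich/ubiquitous-fiesta | TZXG9RfcZ7T3o43QF_3.py | same_length
-- ===== SOURCE A (Python) =====
-- def same_length(txt):
--   ones = [i for i in txt.split('0') if i != '']
--   zeroes = [i for i in txt.split('1') if i != '']
--   if len(ones) != len(zeroes):
--     return False
--   for i in range(len(ones)):
--     if len(ones[i]) != len(zeroes[i]):
--       return False
--   return True
-- ===== SOURCE B (Python) =====
-- def same_length(txt):
--   run0 = 0   # length of current run of non-'0' chars
--   run1 = 0   # length of current run of non-'1' chars
--   ones = []
--   zeroes = []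
--   for ch in txt:
--     if ch == '0':
--       if run0:
--         ones.append(run0)
--       run0 = 0
--       run1 += 1
--     elif ch == '1':
--       if run1:
--         zeroes.append(run1)
--       run1 = 0
--       run0 += 1
--     else:
--       run0 += 1
--       run1 += 1
--   if run0:
--     ones.append(run0)
--   if run1:
--     zeroes.append(run1)
--   return ones == zeroes
-- ===== Notes on version B (the rewrite author's own statement) =====
-- stated objective: alternative
-- what changed: A splits the string twice ('0'-split and '1'-split), filters out empty pieces and compares piece lengths with an index loop; B makes a single pass over the characters maintaining two run counters and two lists of run lengths, flushing a counter whenever its delimiter is seen, and compares the two length lists.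
import Mathlib
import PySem

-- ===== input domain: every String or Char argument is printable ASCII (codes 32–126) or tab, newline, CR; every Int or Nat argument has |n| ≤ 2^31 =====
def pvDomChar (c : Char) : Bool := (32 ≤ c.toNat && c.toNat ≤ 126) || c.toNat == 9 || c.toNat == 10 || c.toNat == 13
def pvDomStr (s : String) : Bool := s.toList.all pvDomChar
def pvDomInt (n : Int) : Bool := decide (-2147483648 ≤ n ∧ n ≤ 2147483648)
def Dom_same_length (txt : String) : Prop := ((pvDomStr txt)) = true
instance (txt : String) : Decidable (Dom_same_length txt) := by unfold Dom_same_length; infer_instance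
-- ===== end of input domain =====

-- B replaces A's two split/filter passes plus an index loop by a single pass over the
-- string maintaining two run counters and two lists of run lengths (objective: alternative).

-- ===== PORT A =====
-- the for-i-in-range loop of A, early return False on a length mismatch
def same_length_loopA (l : List Int) (ones zeroes : List String) : Bool :=
  match l with
  | [] => true
  | i :: rest =>
    match PySem.List.pyGet? ones i, PySem.List.pyGet? zeroes i with
    | some a, some b =>
      if PySem.Str.len a ≠ PySem.Str.len b then false
      else same_length_loopA rest ones zeroes
    | _, _ => false  -- unreachable: i ∈ range(len ones) and len ones = len zeroes

def same_length (txt : String) : Bool :=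
  match PySem.Str.split? txt "0", PySem.Str.split? txt "1" with
  | some s0, some s1 =>
    let ones := s0.filter (fun i => i ≠ "")
    let zeroes := s1.filter (fun i => i ≠ "")
    if ones.length ≠ zeroes.length then false
    else same_length_loopA (PySem.List.pyRange 0 ones.length 1) ones zeroes
  | _, _ => false  -- unreachable: the separators "0" and "1" are nonempty

-- ===== PORT B =====
def same_length_step (s : Nat × Nat × List Nat × List Nat) (ch : Char) :
    Nat × Nat × List Nat × List Nat :=
  let (run0, run1, ones, zeroes) := s
  if ch = '0' then (0, run1 + 1, if run0 ≠ 0 then ones ++ [run0] else ones, zeroes)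
  else if ch = '1' then (run0 + 1, 0, ones, if run1 ≠ 0 then zeroes ++ [run1] else zeroes)
  else (run0 + 1, run1 + 1, ones, zeroes)

def same_length_alt (txt : String) : Bool :=
  let st := txt.toList.foldl same_length_step (0, 0, [], [])
  let (run0, run1, ones, zeroes) := st
  let ones := if run0 ≠ 0 then ones ++ [run0] else ones
  let zeroes := if run1 ≠ 0 then zeroes ++ [run1] else zeroes
  ones == zeroes

-- ===== PRECONDITION & SPEC =====
def Spec_same_length (txt : String) (out : Bool) : Prop := out = same_length_alt txt
instance (txt : String) (out : Bool) : Decidable (Spec_same_length txt out) := by unfold Spec_same_length; infer_instance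

-- ===== CLAIM (what is proved, stated in full; the proofs are below) =====
def Claim_equal_same_length : Prop := ∀ (txt : String), Dom_same_length txt → Spec_same_length txt (same_length txt)

-- ===== LEMMAS AND PROOFS =====

-- segments of s cut at every occurrence of c (empties kept), front recursion
def pvSegs (c : Char) : List Char → List (List Char)
  | [] => [[]]
  | x :: xs => if x = c then [] :: pvSegs c xs else (pvSegs c xs).modifyHead (x :: ·)

theorem pvSegs_ne_nil (c : Char) (l : List Char) : pvSegs c l ≠ [] := by
  induction l with
  | nil => simp [pvSegs]
  | cons x xs ih =>
    simp only [pvSegs]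
    split
    · simp
    · cases h : pvSegs c xs with
      | nil => exact absurd h ih
      | cons a t => simp [List.modifyHead]

theorem pvModifyHead_modifyHead {α : Type} (f g : α → α) (l : List α) :
    (l.modifyHead g).modifyHead f = l.modifyHead (fun a => f (g a)) := by
  cases l <;> simp [List.modifyHead]

theorem pvGo_single (c : Char) :
    ∀ (fuel : Nat) (l cur : List Char) (acc : List (List Char)), l.length ≤ fuel →
    PySem.Chars.splitOn.go [c] fuel l cur acc
      = acc.reverse ++ (pvSegs c l).modifyHead (cur.reverse ++ ·) := by
  intro fuel
  induction fuel with
  | zero =>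
    intro l cur acc h
    have hl : l = [] := by cases l with
      | nil => rfl
      | cons a t => simp at h
    subst hl
    simp [PySem.Chars.splitOn.go, pvSegs, List.modifyHead]
  | succ n ih =>
    intro l cur acc h
    cases l with
    | nil => simp [PySem.Chars.splitOn.go, pvSegs, List.modifyHead]
    | cons x rest =>
      by_cases hx : x = c
      · subst hx
        have hpre : [x].isPrefixOf (x :: rest) = true := by simp [List.isPrefixOf]
        rw [PySem.Chars.splitOn.go]
        simp only [hpre, if_pos]
        rw [show List.drop [x].length (x :: rest) = rest from rfl]
        rw [ih rest [] _ (by simpa using Nat.le_of_succ_le_succ h)]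
        simp only [pvSegs, List.modifyHead, List.reverse_cons, List.reverse_nil,
          List.nil_append, List.append_assoc, List.singleton_append]
        cases hseg : pvSegs x rest with
        | nil => exact absurd hseg (pvSegs_ne_nil x rest)
        | cons a t => simp
      · have hpre : [c].isPrefixOf (x :: rest) = false := by
          simp [List.isPrefixOf]
          exact fun hcx => absurd hcx.symm hx
        rw [PySem.Chars.splitOn.go]
        simp only [hpre]
        rw [if_neg (by simp)]
        rw [ih rest (x :: cur) acc (by simpa using Nat.le_of_succ_le_succ h)]
        simp only [pvSegs, if_neg hx, pvModifyHead_modifyHead]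
        simp

theorem pvSplitOn_single (c : Char) (s : List Char) :
    PySem.Chars.splitOn s [c] = pvSegs c s := by
  rw [PySem.Chars.splitOn, pvGo_single c (s.length + 1) s [] [] (Nat.le_succ _)]
  cases h : pvSegs c s with
  | nil => exact absurd h (pvSegs_ne_nil c s)
  | cons a t => simp [List.modifyHead]

-- head adjustment: add r to the first element
def pvAddHead (r : Nat) : List Nat → List Nat
  | [] => []
  | h :: t => (r + h) :: t

theorem pvAddHead_zero (l : List Nat) : pvAddHead 0 l = l := by
  cases l <;> simp [pvAddHead]

theorem pvAddHead_addHead (r s : Nat) (l : List Nat) :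
    pvAddHead r (pvAddHead s l) = pvAddHead (r + s) l := by
  cases l <;> simp [pvAddHead] <;> omega

theorem pvSegLens_cons_ne (c x : Char) (xs : List Char) (h : ¬ x = c) :
    (pvSegs c (x :: xs)).map List.length = pvAddHead 1 ((pvSegs c xs).map List.length) := by
  simp only [pvSegs, if_neg h]
  cases hseg : pvSegs c xs with
  | nil => exact absurd hseg (pvSegs_ne_nil c xs)
  | cons a t => simp [List.modifyHead, pvAddHead, Nat.add_comm]

theorem pvSegLens_cons_eq (c : Char) (xs : List Char) :
    (pvSegs c (c :: xs)).map List.length = 0 :: (pvSegs c xs).map List.length := by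
  simp [pvSegs]

theorem pvFilter_cons_head (r : Nat) (l o : List Nat) :
    o ++ (pvAddHead r (0 :: l)).filter (fun n => n ≠ 0)
      = (if r ≠ 0 then o ++ [r] else o) ++ l.filter (fun n => n ≠ 0) := by
  simp only [pvAddHead, Nat.add_zero, List.filter_cons]
  split <;> split <;> simp_all

-- B's fold, flushed, computes the positive run lengths of both cut patterns
theorem pvFoldB : ∀ (s : List Char) (r0 r1 : Nat) (o z : List Nat),
    (fun st : Nat × Nat × List Nat × List Nat =>
      ((if st.1 ≠ 0 then st.2.2.1 ++ [st.1] else st.2.2.1),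
       (if st.2.1 ≠ 0 then st.2.2.2 ++ [st.2.1] else st.2.2.2)))
      (List.foldl same_length_step (r0, r1, o, z) s)
    = (o ++ (pvAddHead r0 ((pvSegs '0' s).map List.length)).filter (fun n => n ≠ 0),
       z ++ (pvAddHead r1 ((pvSegs '1' s).map List.length)).filter (fun n => n ≠ 0)) := by
  intro s
  induction s with
  | nil =>
    intro r0 r1 o z
    refine Prod.ext_iff.mpr ⟨?_, ?_⟩ <;>
      simpa [pvSegs] using (pvFilter_cons_head _ [] _).symm
  | cons x xs ih =>
    intro r0 r1 o z
    by_cases h0 : x = '0'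
    · subst h0
      rw [List.foldl_cons, show same_length_step (r0, r1, o, z) '0'
            = (0, r1 + 1, if r0 ≠ 0 then o ++ [r0] else o, z) from by simp [same_length_step]]
      rw [ih]
      rw [pvSegLens_cons_eq, pvSegLens_cons_ne '1' '0' xs (by decide), pvAddHead_addHead,
        pvFilter_cons_head, pvAddHead_zero]
    · by_cases h1 : x = '1'
      · subst h1
        rw [List.foldl_cons, show same_length_step (r0, r1, o, z) '1'
              = (r0 + 1, 0, o, if r1 ≠ 0 then z ++ [r1] else z) from by simp [same_length_step]]
        rw [ih]
        rw [pvSegLens_cons_eq, pvSegLens_cons_ne '0' '1' xs (by decide), pvAddHead_addHead,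
          pvFilter_cons_head, pvAddHead_zero]
      · rw [List.foldl_cons, show same_length_step (r0, r1, o, z) x
              = (r0 + 1, r1 + 1, o, z) from by simp [same_length_step, h0, h1]]
        rw [ih]
        rw [pvSegLens_cons_ne '0' x xs h0, pvSegLens_cons_ne '1' x xs h1,
            pvAddHead_addHead, pvAddHead_addHead]

theorem pvAlt_eq (txt : String) : same_length_alt txt =
    (((pvSegs '0' txt.toList).map List.length).filter (fun n => n ≠ 0) ==
     ((pvSegs '1' txt.toList).map List.length).filter (fun n => n ≠ 0)) := by
  have h := pvFoldB txt.toList 0 0 [] []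
  simp only [pvAddHead_zero] at h
  unfold same_length_alt
  rcases hst : List.foldl same_length_step (0, 0, [], []) txt.toList with ⟨a, b, os, zs⟩
  rw [hst] at h
  simp only [Prod.mk.injEq, List.nil_append] at h
  obtain ⟨h1, h2⟩ := h
  simp only [h1, h2]

-- A-side: the strings kept by filter, measured, are the positive run lengths
theorem pvMapFilter (l : List (List Char)) :
    ((l.map String.ofList).filter (fun i => i ≠ "")).map PySem.Str.len
      = (((l.map List.length).filter (fun n => n ≠ 0)).map (fun n => Int.ofNat n)) := by
  induction l with
  | nil => rfl
  | cons a t ih =>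
    simp only [List.map_cons, List.filter_cons]
    by_cases ha : a = []
    · subst ha
      simpa using ih
    · have hne : String.ofList a ≠ "" := fun hc => ha (by
        simpa using congrArg String.toList hc)
      have hlen : a.length ≠ 0 := by simpa [List.length_eq_zero_iff] using ha
      simp only [ne_eq, decide_not] at ih
      simp only [hne, hlen, ne_eq, decide_not, decide_eq_true_eq, not_false_eq_true,
        decide_true, Bool.not_false, if_pos, List.map_cons, ih]
      congr 1
      simp [PySem.Str.len]

theorem pvLoopA_all (l : List Int) (xs ys : List String) :
    same_length_loopA l xs ys = l.all (fun i =>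
      match PySem.List.pyGet? xs i, PySem.List.pyGet? ys i with
      | some a, some b => !(decide (PySem.Str.len a ≠ PySem.Str.len b))
      | _, _ => false) := by
  induction l with
  | nil => rfl
  | cons i rest ih =>
    rw [same_length_loopA, List.all_cons]
    cases hx : PySem.List.pyGet? xs i <;> cases hy : PySem.List.pyGet? ys i <;>
      simp only [ih]
    · simp
    · simp
    · simp
    · rename_i a b
      by_cases hab : PySem.Str.len a = PySem.Str.len b
      · simp [hab]
      · simp [hab]

theorem pvLoopA_eq (xs ys : List String) (h : xs.length = ys.length) :
    same_length_loopA (PySem.List.pyRange 0 (xs.length : Int) 1) xs ys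
      = (xs.map PySem.Str.len == ys.map PySem.Str.len) := by
  rw [pvLoopA_all, PySem.List.pyRange_one]
  have hn : ((xs.length : Int) - 0).toNat = xs.length := by simp
  rw [hn, List.all_map]
  rw [Bool.eq_iff_iff]
  simp only [List.all_eq_true, List.mem_range, Function.comp]
  constructor
  · intro hall
    have hmap : xs.map PySem.Str.len = ys.map PySem.Str.len := by
      apply List.ext_getElem (by simp [h])
      intro i h1 h2
      have := hall i (by simpa using h1)
      simp only [zero_add, PySem.List.pyGet?_natCast] at this
      rw [List.getElem?_eq_getElem (by simpa using h1),
          List.getElem?_eq_getElem (by rw [← h]; simpa using h1)] at this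
      simp only [List.getElem_map]
      simpa using this
    simp [hmap]
  · intro hmap k hk
    have hmap' : xs.map PySem.Str.len = ys.map PySem.Str.len := by simpa using hmap
    have hk' : k < ys.length := by rw [← h]; exact hk
    have hget : PySem.Str.len xs[k] = PySem.Str.len ys[k] := by
      have := congrArg (fun l => l[k]?) hmap'
      simpa [List.getElem?_eq_getElem, hk, hk', List.getElem?_map] using this
    simp only [zero_add, PySem.List.pyGet?_natCast]
    rw [List.getElem?_eq_getElem hk, List.getElem?_eq_getElem hk']
    simpa using hget

theorem pvCastEq (xs ys : List Nat) :
    (xs.map (fun n => Int.ofNat n) == ys.map (fun n => Int.ofNat n)) = (xs == ys) := by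
  rw [Bool.eq_iff_iff]
  simp only [beq_iff_eq]
  constructor
  · intro hmap
    exact List.map_injective_iff.mpr (fun a b hab => Int.ofNat_inj.mp hab) hmap
  · intro he; rw [he]

theorem pvA_eq (txt : String) : same_length txt =
    ((((pvSegs '0' txt.toList).map String.ofList).filter (fun i => i ≠ "")).map PySem.Str.len ==
     (((pvSegs '1' txt.toList).map String.ofList).filter (fun i => i ≠ "")).map PySem.Str.len) := by
  unfold same_length
  rw [show PySem.Str.split? txt "0"
        = some ((pvSegs '0' txt.toList).map String.ofList) from by
      simp [PySem.Str.split?, PySem.Chars.split?, pvSplitOn_single]]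
  rw [show PySem.Str.split? txt "1"
        = some ((pvSegs '1' txt.toList).map String.ofList) from by
      simp [PySem.Str.split?, PySem.Chars.split?, pvSplitOn_single]]
  simp only []
  set os := ((pvSegs '0' txt.toList).map String.ofList).filter (fun i => i ≠ "") with hos
  set zs := ((pvSegs '1' txt.toList).map String.ofList).filter (fun i => i ≠ "") with hzs
  by_cases hl : os.length = zs.length
  · rw [if_neg (by simpa using hl)]
    exact pvLoopA_eq os zs hl
  · rw [if_pos (by simpa using hl)]
    have : (os.map PySem.Str.len == zs.map PySem.Str.len) = false := by
      rw [beq_eq_false_iff_ne]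
      intro hc
      exact hl (by simpa using congrArg List.length hc)
    rw [this]

-- ===== VERDICT (by name: the statement is the Claim_ definition above) =====
theorem same_length_spec : Claim_equal_same_length := by
  intro txt _
  unfold Spec_same_length
  rw [pvA_eq, pvAlt_eq, pvMapFilter, pvMapFilter, pvCastEq]
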